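-- pv_equiv track=rewrite | github.com/kbudaj/AdventOfCode2016 | day4/script.py | isReal
-- ===== SOURCE A (Python) =====
-- def makeCheckSum(dic):
--     keys = sorted(dic.keys())[::-1]
--     checkSum = []
--     for key in keys:
--         for char in dic[key]:
--             checkSum.append(char)
--
--     return checkSum[:5]
--
-- def isReal(line):
--     line, checkSum = line.split("[")
--     checkSum = checkSum.split("]")[0]
--     record = {}
--     valRecord = {}
--
--     for char in line:
--         if char.isalpha():
--             if char in record.keys():
--                 record[char] += 1
--             else:
--                 record[char] = 1
--
--     for char in record.keys():
--         value = record[char]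
--         if value in valRecord.keys():
--             valRecord[value] = sorted(valRecord[value] + [char])
--         else:
--             valRecord[value] = [char]
--
--     return "".join(makeCheckSum(valRecord)) == checkSum
-- ===== SOURCE B (Python) =====
-- def isReal(line):
--     name, rest = line.split("[")
--     checksum = rest.split("]")[0]
--     counts = {}
--     for ch in name:
--         if ch.isalpha():
--             counts[ch] = counts.get(ch, 0) + 1
--     top5 = sorted(counts.items(), key=lambda kv: (-kv[1], kv[0]))[:5]
--     return "".join(ch for ch, _ in top5) == checksum
-- ===== Notes on version B (the rewrite author's own statement) =====
-- stated objective: idiomatic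
-- what changed: B replaces A's inverted count->sorted-char-list dictionary plus descending key walk (makeCheckSum) by the standard idiom: sort the (char,count) items once with the composite key (-count, char) and take the first five.
import Mathlib
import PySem

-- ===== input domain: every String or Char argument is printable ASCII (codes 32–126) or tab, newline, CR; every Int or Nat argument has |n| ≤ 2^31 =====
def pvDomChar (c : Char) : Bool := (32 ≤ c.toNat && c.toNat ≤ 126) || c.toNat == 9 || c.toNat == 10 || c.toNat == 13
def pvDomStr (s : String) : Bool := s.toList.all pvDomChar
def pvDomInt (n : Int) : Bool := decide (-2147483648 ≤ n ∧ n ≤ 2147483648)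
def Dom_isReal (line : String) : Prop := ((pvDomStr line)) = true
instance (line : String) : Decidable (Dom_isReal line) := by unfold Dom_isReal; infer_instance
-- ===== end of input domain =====

-- B replaces A's inverted count->charlist dict + descending key walk by one sort of the
-- (char,count) items with composite key (-count, char); idiomatic, same result.

-- ===== PORT A =====
-- makeCheckSum: sorted(dic.keys())[::-1] is sort-then-reverse ([::-1] = reverse, cf.
-- PySem.List.slice?_none_none_neg_one); the two Python for-loops are the two folds over
-- the same accumulator list; dic[key] is getD with [] (every key passed in is present);
-- checkSum[:5] is the slice.
def makeCheckSum (dic : PySem.Dict Int (List Char)) : List Char :=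
  let keys := (PySem.List.sorted dic.keys (fun x => x)).reverse
  let checkSum := keys.foldl (fun acc key => (dic.getD key []).foldl (fun a ch => a ++ [ch]) acc) []
  PySem.List.slice checkSum none (some 5)

-- 'line, checkSum = line.split("[")' succeeds only on a 2-element split (else ValueError,
-- excluded by Pre_isReal; the catch-all arm returns false there).  checkSum.split("]")[0]
-- is headD (a split is never empty).  record[char] += 1 is insert c (getD c 0 + 1): the
-- key is present in that branch.  "".join(chars) == checkSum is compared on code points.
def isReal (line : String) : Bool :=
  match PySem.Str.split? line "[" with
  | some [linePart, rest] =>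
    let checkSum := ((PySem.Str.split? rest "]").getD []).headD ""
    let record := linePart.toList.foldl (fun (r : PySem.Dict Char Int) c =>
        if PySem.Chars.isalpha c then
          if r.contains c then r.insert c (r.getD c 0 + 1)
          else r.insert c 1
        else r) PySem.Dict.empty
    let valRecord := record.keys.foldl (fun (v : PySem.Dict Int (List Char)) c =>
        let value := record.getD c 0
        if v.contains value then
          v.insert value (PySem.List.sorted (v.getD value [] ++ [c]) (fun x => x))
        else v.insert value [c]) PySem.Dict.empty
    makeCheckSum valRecord == checkSum.toList
  | _ => false

-- ===== PORT B =====
-- counts[ch] = counts.get(ch, 0) + 1 is insert ch (getD ch 0 + 1); sorted(counts.items(),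
-- key=lambda kv: (-kv[1], kv[0])) is sorted2 with k1 = -count, k2 = char; [:5] is the
-- slice; "".join of the five chars == checksum is compared on code points.
def isReal_alt (line : String) : Bool :=
  -- split? with a nonempty separator is never none; the two-target unpack succeeds
  -- exactly when the split has two pieces (first = headD, second = getLastD), anything
  -- else is the ValueError case (excluded by Pre_isReal)
  let parts := (PySem.Str.split? line "[").getD []
  if parts.length == 2 then
    let name := parts.headD ""
    let rest := parts.getLastD ""
    let checksum := ((PySem.Str.split? rest "]").getD []).headD ""
    let counts := name.toList.foldl (fun (d : PySem.Dict Char Int) ch =>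
        if PySem.Chars.isalpha ch then d.insert ch (d.getD ch 0 + 1) else d) PySem.Dict.empty
    let top5 := PySem.List.slice
        (PySem.List.sorted2 counts.items (fun kv => -kv.2) (fun kv => kv.1)) none (some 5)
    top5.map (fun kv => kv.1) == checksum.toList
  else false

-- ===== PRECONDITION & SPEC =====
-- A (and B alike) raises ValueError unpacking line.split("[") unless the line contains
-- exactly one '['; Pre_ excludes exactly those raising inputs.
def Pre_isReal (line : String) : Prop := PySem.Str.count line "[" = 1
instance (line : String) : Decidable (Pre_isReal line) := by unfold Pre_isReal; infer_instance
def pvWitness_isReal : String := "aab[ab]"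
def Spec_isReal (line : String) (out : Bool) : Prop := out = isReal_alt line
instance (line : String) (out : Bool) : Decidable (Spec_isReal line out) := by unfold Spec_isReal; infer_instance

-- ===== CLAIM (what is proved, stated in full; the proofs are below) =====
def Claim_equal_isReal : Prop := ∀ (line : String), Dom_isReal line → Pre_isReal line → Spec_isReal line (isReal line)

-- ===== LEMMAS AND PROOFS =====

-- the comparator sorted2 uses for key (-count, char)
def pvLt (a b : Char × Int) : Bool :=
  decide (-a.2 < -b.2) || (!decide (-b.2 < -a.2) && decide (a.1 < b.1))

theorem pvLt_iff (a b : Char × Int) :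
    pvLt a b = true ↔ (b.2 < a.2 ∨ (a.2 = b.2 ∧ a.1 < b.1)) := by
  rcases a with ⟨c1, n1⟩; rcases b with ⟨c2, n2⟩
  simp only [pvLt, Bool.or_eq_true, Bool.and_eq_true, Bool.not_eq_true',
    decide_eq_true_eq, decide_eq_false_iff_not]
  constructor
  · rintro (h | ⟨h1, h2⟩)
    · left; omega
    · by_cases he : n1 = n2
      · right; exact ⟨he, h2⟩
      · left; omega
  · rintro (h | ⟨h1, h2⟩)
    · left; omega
    · right; exact ⟨by omega, h2⟩

theorem pvLt_asymm {a b : Char × Int} (h : pvLt a b = true) : pvLt b a = false := by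
  cases hba : pvLt b a with
  | false => rfl
  | true =>
    exfalso
    rw [pvLt_iff] at h hba
    rcases h with h | ⟨h1, h2⟩ <;> rcases hba with g | ⟨g1, g2⟩
    · omega
    · omega
    · omega
    · exact absurd (h2.trans g2) (lt_irrefl _)

theorem pvLt_trans {a b c : Char × Int} (hab : pvLt a b = true) (hbc : pvLt b c = true) :
    pvLt a c = true := by
  rw [pvLt_iff] at hab hbc ⊢
  rcases hab with h | ⟨h1, h2⟩ <;> rcases hbc with g | ⟨g1, g2⟩
  · left; omega
  · left; omega
  · left; omega
  · right; exact ⟨h1.trans g1, h2.trans g2⟩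

theorem pvLt_ne {a b : Char × Int} (h : pvLt a b = true) : a ≠ b := by
  rw [pvLt_iff] at h
  rintro rfl
  rcases h with h | ⟨_, h⟩ <;> exact absurd h (lt_irrefl _)

theorem pvLt_not_true {a b : Char × Int} (h : ¬ pvLt a b = true) : pvLt a b = false :=
  Bool.not_eq_true _ ▸ h

-- insertBy with pvLt preserves "no later element is pvLt-before an earlier one"
theorem pv_insertBy_pairwise (x : Char × Int) (ys : List (Char × Int))
    (h : ys.Pairwise (fun a b => pvLt b a = false)) :
    (PySem.List.insertBy pvLt x ys).Pairwise (fun a b => pvLt b a = false) := by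
  induction ys with
  | nil => simp [PySem.List.insertBy]
  | cons y ys ih =>
    rw [List.pairwise_cons] at h
    by_cases hb : pvLt x y = true
    · rw [show PySem.List.insertBy pvLt x (y :: ys) = x :: y :: ys by
        simp [PySem.List.insertBy, hb]]
      refine List.pairwise_cons.mpr ⟨?_, List.pairwise_cons.mpr h⟩
      intro z hz
      rcases List.mem_cons.mp hz with rfl | hzs
      · exact pvLt_asymm hb
      · cases hzx : pvLt z x with
        | false => rfl
        | true =>
          -- z after y in the sorted list, yet pvLt z x with pvLt x y: contradiction
          have hzy : pvLt z y = true := pvLt_trans hzx hb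
          rw [h.1 z hzs] at hzy; exact absurd hzy (by simp)
    · rw [show PySem.List.insertBy pvLt x (y :: ys) = y :: PySem.List.insertBy pvLt x ys by
        simp [PySem.List.insertBy, hb]]
      refine List.pairwise_cons.mpr ⟨?_, ih h.2⟩
      intro z hz
      rw [PySem.List.mem_insertBy] at hz
      rcases hz with rfl | hzs
      · exact pvLt_not_true hb
      · exact h.1 z hzs

theorem pv_foldl_insertBy_pairwise (xs : List (Char × Int)) :
    ∀ acc : List (Char × Int), acc.Pairwise (fun a b => pvLt b a = false) →
    (xs.foldl (fun acc x => PySem.List.insertBy pvLt x acc) acc).Pairwise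
      (fun a b => pvLt b a = false) := by
  induction xs with
  | nil => intro acc h; exact h
  | cons x xs ih =>
    intro acc h
    exact ih _ (pv_insertBy_pairwise x acc h)

-- uniqueness of a strictly pvLt-increasing rearrangement
theorem pv_sorted_unique :
    ∀ (l₂ l₁ : List (Char × Int)), l₁.Perm l₂ →
      l₁.Pairwise (fun a b => pvLt b a = false) →
      l₂.Pairwise (fun a b => pvLt a b = true) → l₁ = l₂ := by
  intro l₂
  induction l₂ with
  | nil =>
    intro l₁ hp _ _
    exact hp.eq_nil
  | cons y t ih =>
    intro l₁ hp h1 h2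
    cases l₁ with
    | nil => exact absurd hp.symm.eq_nil (by simp)
    | cons a s =>
      have hay : a = y := by
        by_contra hne
        have hat : a ∈ t := by
          rcases List.mem_cons.mp (hp.subset (List.mem_cons_self)) with h | h
          · exact absurd h hne
          · exact h
        have hys : y ∈ s := by
          rcases List.mem_cons.mp (hp.symm.subset (List.mem_cons_self)) with h | h
          · exact absurd h.symm hne
          · exact h
        have htrue : pvLt y a = true := (List.pairwise_cons.mp h2).1 a hat
        have hfalse : pvLt y a = false := (List.pairwise_cons.mp h1).1 y hys
        rw [htrue] at hfalse; exact absurd hfalse (by simp)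
      subst hay
      have := ih s (hp.cons_inv) (List.pairwise_cons.mp h1).2 (List.pairwise_cons.mp h2).2
      rw [this]

-- sorted2 with key (-count, char) IS foldl insertBy pvLt
theorem pv_sorted2_def (xs : List (Char × Int)) :
    PySem.List.sorted2 xs (fun kv => -kv.2) (fun kv => kv.1)
      = xs.foldl (fun acc x => PySem.List.insertBy pvLt x acc) [] := rfl

theorem pv_sorted2_eq_of_perm_of_pairwise (xs ys : List (Char × Int))
    (hperm : ys.Perm xs) (hpw : ys.Pairwise (fun a b => pvLt a b = true)) :
    PySem.List.sorted2 xs (fun kv => -kv.2) (fun kv => kv.1) = ys := by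
  rw [pv_sorted2_def]
  have h0 : (xs.foldl (fun acc x => PySem.List.insertBy pvLt x acc) []).Perm xs := by
    simpa using PySem.List.foldl_insertBy_perm pvLt xs []
  exact pv_sorted_unique ys _ (h0.trans hperm.symm)
    (pv_foldl_insertBy_pairwise xs [] (by simp))
    hpw

-- ≤-sorted and Nodup gives <-sorted
theorem pv_pairwise_lt {α : Type} [LinearOrder α] {xs : List α}
    (h1 : xs.Pairwise (fun a b => a ≤ b)) (h2 : xs.Nodup) :
    xs.Pairwise (fun a b => a < b) :=
  (h1.and h2).imp (fun h => lt_of_le_of_ne h.1 h.2)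

-- a guarded fold is the fold over the filter
theorem pv_foldl_guard_filter {α β : Type} (p : α → Bool) (g : β → α → β) :
    ∀ (cs : List α) (d : β),
      cs.foldl (fun d c => if p c then g d c else d) d = (cs.filter p).foldl g d := by
  intro cs
  induction cs with
  | nil => intro d; rfl
  | cons c cs ih =>
    intro d
    by_cases h : p c = true <;> simp [h, ih]

-- appending element-wise is appending
theorem pv_foldl_snoc {α : Type} (xs : List α) :
    ∀ acc : List α, xs.foldl (fun a ch => a ++ [ch]) acc = acc ++ xs := by
  induction xs with
  | nil => intro acc; simp
  | cons x xs ih => intro acc; simp [ih]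

-- A's record loop is Counter(filter(isalpha, line))
theorem pv_record_eq (cs : List Char) :
    cs.foldl (fun (r : PySem.Dict Char Int) c =>
        if PySem.Chars.isalpha c then
          if r.contains c then r.insert c (r.getD c 0 + 1)
          else r.insert c 1
        else r) PySem.Dict.empty
      = PySem.Dict.counter (cs.filter PySem.Chars.isalpha) := by
  have hstep : (fun (r : PySem.Dict Char Int) c =>
      if r.contains c then r.insert c (r.getD c 0 + 1) else r.insert c 1)
      = fun (r : PySem.Dict Char Int) c => r.insert c (r.getD c 0 + 1) := by
    funext r c
    by_cases h : r.contains c = true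
    · simp [h]
    · rw [if_neg (by simp [h]), PySem.Dict.getD_of_not_contains r 0 (by simp [h])]
      norm_num
  calc cs.foldl (fun (r : PySem.Dict Char Int) c =>
        if PySem.Chars.isalpha c then
          if r.contains c then r.insert c (r.getD c 0 + 1) else r.insert c 1
        else r) PySem.Dict.empty
      = cs.foldl (fun (r : PySem.Dict Char Int) c =>
          if PySem.Chars.isalpha c then r.insert c (r.getD c 0 + 1) else r) PySem.Dict.empty := by
        simp only [show (fun (r : PySem.Dict Char Int) c =>
          if PySem.Chars.isalpha c then
            if r.contains c then r.insert c (r.getD c 0 + 1) else r.insert c 1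
          else r) = fun (r : PySem.Dict Char Int) c =>
            if PySem.Chars.isalpha c then r.insert c (r.getD c 0 + 1) else r from by
          funext r c; by_cases h : PySem.Chars.isalpha c <;> simp [h, congrFun (congrFun hstep r) c]]
    _ = (cs.filter PySem.Chars.isalpha).foldl
          (fun (r : PySem.Dict Char Int) c => r.insert c (r.getD c 0 + 1)) PySem.Dict.empty :=
        pv_foldl_guard_filter _ _ cs _
    _ = PySem.Dict.counter (cs.filter PySem.Chars.isalpha) :=
        PySem.Dict.foldl_insert_getD_add_one_eq_counter _

-- B's counts loop is the same Counter
theorem pv_counts_eq (cs : List Char) :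
    cs.foldl (fun (d : PySem.Dict Char Int) ch =>
        if PySem.Chars.isalpha ch then d.insert ch (d.getD ch 0 + 1) else d) PySem.Dict.empty
      = PySem.Dict.counter (cs.filter PySem.Chars.isalpha) := by
  rw [pv_foldl_guard_filter]
  exact PySem.Dict.foldl_insert_getD_add_one_eq_counter _

-- the grouping fold, as one insert per step
theorem pv_group_step (cnt : Char → Int) :
    (fun (v : PySem.Dict Int (List Char)) c =>
      if v.contains (cnt c) then
        v.insert (cnt c) (PySem.List.sorted (v.getD (cnt c) [] ++ [c]) (fun x => x))
      else v.insert (cnt c) [c])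
    = fun (v : PySem.Dict Int (List Char)) c =>
        v.insert (cnt c) (if v.contains (cnt c) then
          PySem.List.sorted (v.getD (cnt c) [] ++ [c]) (fun x => x) else [c]) := by
  funext v c
  by_cases h : v.contains (cnt c) = true <;> simp [h]

theorem pv_group_keys (cnt : Char → Int) (P : List Char) :
    (P.foldl (fun (v : PySem.Dict Int (List Char)) c =>
        if v.contains (cnt c) then
          v.insert (cnt c) (PySem.List.sorted (v.getD (cnt c) [] ++ [c]) (fun x => x))
        else v.insert (cnt c) [c]) PySem.Dict.empty).keys
      = PySem.Set.ofList (P.map cnt) := by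
  rw [pv_group_step]
  rw [PySem.Dict.keys_foldl_insert_key P cnt
      (fun v c => if v.contains (cnt c) then
        PySem.List.sorted (v.getD (cnt c) [] ++ [c]) (fun x => x) else [c]) PySem.Dict.empty]
  rfl

theorem pv_group_getD (cnt : Char → Int) (P : List Char) (n : Int) :
    (P.foldl (fun (v : PySem.Dict Int (List Char)) c =>
        if v.contains (cnt c) then
          v.insert (cnt c) (PySem.List.sorted (v.getD (cnt c) [] ++ [c]) (fun x => x))
        else v.insert (cnt c) [c]) PySem.Dict.empty).getD n []
      = PySem.List.sorted (P.filter (fun c => cnt c == n)) (fun x => x) := by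
  induction P using List.reverseRecOn generalizing n with
  | nil => simp [PySem.Dict.getD_empty]; rfl
  | append_singleton P c ih =>
    rw [List.foldl_append, List.foldl_cons, List.foldl_nil]
    set V := P.foldl (fun (v : PySem.Dict Int (List Char)) c =>
        if v.contains (cnt c) then
          v.insert (cnt c) (PySem.List.sorted (v.getD (cnt c) [] ++ [c]) (fun x => x))
        else v.insert (cnt c) [c]) PySem.Dict.empty with hV
    have hkeys : V.keys = PySem.Set.ofList (P.map cnt) := pv_group_keys cnt P
    have hcont : V.contains (cnt c) = true ↔ cnt c ∈ P.map cnt := by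
      rw [PySem.Dict.contains_iff_mem_keys, hkeys, PySem.Set.mem_ofList]
    by_cases hn : cnt c = n
    · subst hn
      have hfil : (P ++ [c]).filter (fun c' => cnt c' == cnt c)
          = P.filter (fun c' => cnt c' == cnt c) ++ [c] := by
        simp [List.filter_append]
      rw [hfil]
      by_cases hc : V.contains (cnt c) = true
      · rw [if_pos hc, PySem.Dict.getD_insert_self, ih]
        exact PySem.List.sorted_eq_sorted_of_perm _ _ _
          (fun a b h => h)
          ((PySem.List.sorted_perm (P.filter (fun c' => cnt c' == cnt c)) (fun x => x)
            false).append_right [c])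
      · rw [if_neg hc, PySem.Dict.getD_insert_self]
        have hempty : P.filter (fun c' => cnt c' == cnt c) = [] := by
          apply List.filter_eq_nil_iff.mpr
          intro c' hc' hbeq
          exact (by simp [hc] : ¬ V.contains (cnt c) = true)
            (hcont.mpr (List.mem_map.mpr ⟨c', hc', by simpa using hbeq⟩))
        rw [hempty]; rfl
    · have hfil : (P ++ [c]).filter (fun c' => cnt c' == n)
          = P.filter (fun c' => cnt c' == n) := by
        simp [List.filter_append, hn]
      rw [hfil, ← ih n]
      by_cases hc : V.contains (cnt c) = true
      · rw [if_pos hc, PySem.Dict.getD_insert_of_ne _ _ _ (fun h => hn h.symm)]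
      · rw [if_neg hc, PySem.Dict.getD_insert_of_ne _ _ _ (fun h => hn h.symm)]

-- pairing each group element with its count value gives a strictly pvLt-increasing flatMap
theorem pv_flat_pairwise (cnt : Char → Int) (K0 : List Char) (hK : K0.Nodup) :
    ∀ (N : List Int), N.Pairwise (fun a b => b < a) →
    (List.flatMap (fun n =>
        (PySem.List.sorted (K0.filter (fun c => cnt c == n)) (fun x => x)).map
          (fun c => (c, n))) N).Pairwise (fun a b => pvLt a b = true) := by
  intro N
  induction N with
  | nil => intro _; simp
  | cons n N ih =>
    intro hN
    rw [List.pairwise_cons] at hN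
    rw [List.flatMap_cons]
    apply List.pairwise_append.mpr
    refine ⟨?_, ih hN.2, ?_⟩
    · -- within the group: counts equal, chars strictly increasing
      apply List.pairwise_map.mpr
      have hsorted := pv_pairwise_lt
        (PySem.List.sorted_pairwise (K0.filter (fun c => cnt c == n)) (fun x => x))
        (((PySem.List.sorted_perm (K0.filter (fun c => cnt c == n)) (fun x => x)
            false).nodup_iff).mpr (hK.filter _))
      exact List.Pairwise.imp
        (fun {a b} (h : a < b) => (pvLt_iff (a, n) (b, n)).mpr (Or.inr ⟨rfl, h⟩)) hsorted
    · -- across groups: counts strictly decreasing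
      intro a ha b hb
      rcases List.mem_map.mp ha with ⟨c, _, rfl⟩
      rcases List.mem_flatMap.mp hb with ⟨m, hm, hbm⟩
      rcases List.mem_map.mp hbm with ⟨c', _, rfl⟩
      exact (pvLt_iff _ _).mpr (Or.inl (hN.1 m hm))

-- the flattened pair list is a permutation of Counter's items
theorem pv_flat_perm (l : List Char) :
    (List.flatMap (fun n =>
        (PySem.List.sorted ((PySem.Set.ofList l).filter
            (fun c => (List.count c l : Int) == n)) (fun x => x)).map
          (fun c => (c, n)))
      ((PySem.List.sorted
          (PySem.Set.ofList ((PySem.Set.ofList l).map (fun c => (List.count c l : Int))))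
          (fun x => x)).reverse)).Perm
      ((PySem.Set.ofList l).map (fun c => (c, (List.count c l : Int)))) := by
  apply (List.perm_ext_iff_of_nodup ?_ ?_).mpr
  · intro x
    constructor
    · intro hx
      rcases List.mem_flatMap.mp hx with ⟨n, _, hxn⟩
      rcases List.mem_map.mp hxn with ⟨c, hc, rfl⟩
      rw [PySem.List.mem_sorted, List.mem_filter] at hc
      refine List.mem_map.mpr ⟨c, hc.1, ?_⟩
      have : (List.count c l : Int) = n := by simpa using hc.2
      rw [this]
    · intro hx
      rcases List.mem_map.mp hx with ⟨c, hc, rfl⟩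
      apply List.mem_flatMap.mpr
      refine ⟨(List.count c l : Int), ?_, ?_⟩
      · rw [List.mem_reverse, PySem.List.mem_sorted, PySem.Set.mem_ofList]
        exact List.mem_map.mpr ⟨c, hc, rfl⟩
      · exact List.mem_map.mpr ⟨c, by
          rw [PySem.List.mem_sorted, List.mem_filter]
          exact ⟨hc, by simp⟩, rfl⟩
  · -- the flatMap is Nodup: it is strictly pvLt-increasing
    have hpw := pv_flat_pairwise (fun c => (List.count c l : Int)) (PySem.Set.ofList l)
      (PySem.Set.nodup_ofList l)
      ((PySem.List.sorted
          (PySem.Set.ofList ((PySem.Set.ofList l).map (fun c => (List.count c l : Int))))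
          (fun x => x)).reverse)
      (by
        rw [List.pairwise_reverse]
        exact pv_pairwise_lt
          (PySem.List.sorted_pairwise _ (fun x => x))
          (((PySem.List.sorted_perm _ (fun x => x) false).nodup_iff).mpr
            (PySem.Set.nodup_ofList _)))
    exact hpw.imp (fun h => pvLt_ne h)
  · exact (PySem.Set.nodup_ofList l).map (fun a b h => congrArg Prod.fst h)

-- the heart: A's whole makeCheckSum pipeline equals B's sorted2-items pipeline
theorem pv_lists_eq (cs : List Char) :
    makeCheckSum
      ((PySem.Dict.counter (cs.filter PySem.Chars.isalpha)).keys.foldl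
        (fun (v : PySem.Dict Int (List Char)) c =>
          if v.contains ((PySem.Dict.counter (cs.filter PySem.Chars.isalpha)).getD c 0) then
            v.insert ((PySem.Dict.counter (cs.filter PySem.Chars.isalpha)).getD c 0)
              (PySem.List.sorted
                (v.getD ((PySem.Dict.counter (cs.filter PySem.Chars.isalpha)).getD c 0) [] ++ [c])
                (fun x => x))
          else v.insert ((PySem.Dict.counter (cs.filter PySem.Chars.isalpha)).getD c 0) [c])
        PySem.Dict.empty)
      = (PySem.List.slice
          (PySem.List.sorted2 (PySem.Dict.counter (cs.filter PySem.Chars.isalpha)).items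
            (fun kv => -kv.2) (fun kv => kv.1)) none (some 5)).map (fun kv => kv.1) := by
  set l := cs.filter PySem.Chars.isalpha with hl
  have hgetD : ∀ c, (PySem.Dict.counter l).getD c 0 = (List.count c l : Int) :=
    fun c => PySem.Dict.getD_counter l c
  have hkeys : (PySem.Dict.counter l).keys = PySem.Set.ofList l := PySem.Dict.keys_counter l
  simp only [hgetD, hkeys]
  set cnt : Char → Int := fun c => (List.count c l : Int) with hcnt
  set K : List Char := PySem.Set.ofList l with hK
  -- the grouping dict
  set V := K.foldl (fun (v : PySem.Dict Int (List Char)) c =>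
      if v.contains (cnt c) then
        v.insert (cnt c) (PySem.List.sorted (v.getD (cnt c) [] ++ [c]) (fun x => x))
      else v.insert (cnt c) [c]) PySem.Dict.empty with hV
  have hVkeys : V.keys = PySem.Set.ofList (K.map cnt) := pv_group_keys cnt K
  have hVgetD : ∀ n, V.getD n [] = PySem.List.sorted (K.filter (fun c => cnt c == n)) (fun x => x) :=
    pv_group_getD cnt K
  -- names for the descending count list and the whole flattened pair list
  set N := (PySem.List.sorted (PySem.Set.ofList (K.map cnt)) (fun x => x)).reverse with hN
  have hsorted2 : PySem.List.sorted2 (PySem.Dict.counter l).items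
      (fun kv => -kv.2) (fun kv => kv.1)
      = List.flatMap (fun n =>
          (PySem.List.sorted (K.filter (fun c => cnt c == n)) (fun x => x)).map
            (fun c => (c, n))) N := by
    apply pv_sorted2_eq_of_perm_of_pairwise
    · have h1 := pv_flat_perm l
      rw [PySem.Dict.items_counter l]
      exact h1
    · exact pv_flat_pairwise cnt K (hK ▸ PySem.Set.nodup_ofList l) N
        (by
          rw [hN, List.pairwise_reverse]
          exact pv_pairwise_lt
            (PySem.List.sorted_pairwise _ (fun x => x))
            (((PySem.List.sorted_perm _ (fun x => x) false).nodup_iff).mpr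
              (PySem.Set.nodup_ofList _)))
  rw [hsorted2]
  -- both sides are now take-5 of the same flattened list
  unfold makeCheckSum
  rw [hVkeys]
  have hflat : ((PySem.List.sorted (PySem.Set.ofList (K.map cnt)) (fun x => x)).reverse).foldl
      (fun acc key => (V.getD key []).foldl (fun a ch => a ++ [ch]) acc) []
      = List.flatMap (fun n => PySem.List.sorted (K.filter (fun c => cnt c == n)) (fun x => x)) N := by
    have : (fun (acc : List Char) key => (V.getD key []).foldl (fun a ch => a ++ [ch]) acc)
        = fun acc key => acc ++ V.getD key [] := by
      funext acc key; exact pv_foldl_snoc _ acc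
    rw [this]
    rw [show ((PySem.List.sorted (PySem.Set.ofList (K.map cnt)) (fun x => x)).reverse) = N from rfl]
    rw [PySem.List.foldl_append_eq_flatMap (fun key => V.getD key []) N []]
    simp only [hVgetD, List.nil_append]
  simp only [hflat]
  rw [PySem.List.slice_to _ (by norm_num : (0:Int) ≤ 5),
      PySem.List.slice_to _ (by norm_num : (0:Int) ≤ 5)]
  rw [List.map_take]
  congr 1
  rw [List.map_flatMap]
  congr 1
  funext n
  rw [List.map_map]
  show _ = List.map (fun c => c) _
  exact (List.map_id' _).symm

-- the full branch-by-branch equality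
theorem pv_eq (line : String) : isReal line = isReal_alt line := by
  unfold isReal isReal_alt
  cases hs : PySem.Str.split? line "[" with
  | none => rfl
  | some parts =>
    rcases parts with _ | ⟨a, _ | ⟨b, _ | ⟨c, rest⟩⟩⟩
    · rfl
    · rfl
    · show (makeCheckSum _ == _) =
        (List.map (fun kv => kv.1)
          (PySem.List.slice
            (PySem.List.sorted2
              (a.toList.foldl (fun (d : PySem.Dict Char Int) ch =>
                  if PySem.Chars.isalpha ch then d.insert ch (d.getD ch 0 + 1) else d)
                PySem.Dict.empty).items
              (fun kv => -kv.2) (fun kv => kv.1)) none (some 5)) ==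
         (((PySem.Str.split? b "]").getD []).headD "").toList)
      rw [pv_record_eq a.toList, pv_counts_eq a.toList]
      exact congrArg (· == (((PySem.Str.split? b "]").getD []).headD "").toList)
        (pv_lists_eq a.toList)
    · rfl

-- ===== VERDICT (by name: the statement is the Claim_ definition above) =====
theorem isReal_spec : Claim_equal_isReal := by
  intro line _ _
  unfold Spec_isReal
  exact pv_eq line
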